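-- pv_equiv track=rewrite | github.com/zimolzak/toddler-language-acquisition | nonpandas.py | cumulative_by_date
-- ===== SOURCE A (Python) =====
-- def cumulative_by_date(date_list, word_list):
--     uniq_dates = list(set(date_list))
--     uniq_dates.sort()
--     cumulative_list = []
--     for u in uniq_dates:
--         N = date_list.count(u)
--         if len(cumulative_list) == 0:
--             cumulative_list.append(N)
--         else:
--             cumulative_list.append(cumulative_list[-1] + N)
--     return uniq_dates, cumulative_list
-- ===== SOURCE B (Python) =====
-- def cumulative_by_date(date_list, word_list):
--     s = sorted(date_list)
--     uniq = []
--     cum = []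
--     i = 0
--     n = len(s)
--     while i < n:
--         j = i + 1
--         while j < n and s[j] == s[i]:
--             j += 1
--         uniq.append(s[i])
--         cum.append(j)
--         i = j
--     return uniq, cum
-- ===== Notes on version B (the rewrite author's own statement) =====
-- stated objective: faster
-- what changed: Instead of building set(date_list), sorting it and re-scanning the whole list with .count for every unique date (one full pass per unique date), B sorts date_list once and does a single group-by walk over the sorted list, emitting each date at its group boundary with the boundary index as the cumulative count.
import Mathlib
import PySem

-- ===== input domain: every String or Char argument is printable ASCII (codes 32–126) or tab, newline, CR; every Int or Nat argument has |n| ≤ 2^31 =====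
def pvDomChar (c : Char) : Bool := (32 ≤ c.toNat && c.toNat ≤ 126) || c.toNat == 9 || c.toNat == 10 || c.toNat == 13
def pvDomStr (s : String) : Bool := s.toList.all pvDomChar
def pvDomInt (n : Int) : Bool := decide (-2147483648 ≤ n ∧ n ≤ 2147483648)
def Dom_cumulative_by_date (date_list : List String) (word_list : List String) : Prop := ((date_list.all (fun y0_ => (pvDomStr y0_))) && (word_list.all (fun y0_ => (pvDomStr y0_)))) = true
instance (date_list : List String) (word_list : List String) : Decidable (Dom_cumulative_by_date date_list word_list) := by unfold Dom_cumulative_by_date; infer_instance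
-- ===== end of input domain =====

-- B sorts the list once and does a single group-by walk over it, instead of A's sort of
-- set(date_list) plus one full .count scan per unique date (objective: faster).

-- ===== PORT A =====
def cumulative_by_date (date_list : List String) (word_list : List String) : List String × List Int :=
  let uniq_dates := PySem.List.sorted (PySem.Set.ofList date_list) (fun x => x) false
  let cumulative_list := uniq_dates.foldl
    (fun acc u =>
      let N : Int := (PySem.List.count date_list u : Int)
      if PySem.List.len acc = 0 then acc ++ [N]
      else acc ++ [PySem.List.pyGetD acc (-1) 0 + N]) []
  (uniq_dates, cumulative_list)

-- ===== PORT B =====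
-- inner loop of Source B: 'j = i + 1; while j < n and s[j] == s[i]: j += 1'
def altScanGroup (s : List String) (n : Nat) (i : Nat) (j : Nat) : Nat :=
  if j < n ∧ (s.getD j "" == s.getD i "") then altScanGroup s n i (j + 1) else j
termination_by n - j
decreasing_by omega

-- termination fact the outer loop's recursion cites (the inner scan never moves j backwards)
theorem le_altScanGroup (s : List String) (n : Nat) (i j : Nat) : j ≤ altScanGroup s n i j := by
  fun_induction altScanGroup <;> omega

-- outer loop of Source B: 'while i < n', state (i, uniq, cum)
def altOuter (s : List String) (n : Nat) (i : Nat) (uniq : List String) (cum : List Int) : List String × List Int :=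
  if i < n then
    let j := altScanGroup s n i (i + 1)
    altOuter s n j (uniq ++ [s.getD i ""]) (cum ++ [(j : Int)])
  else (uniq, cum)
termination_by n - i
decreasing_by have := le_altScanGroup s n i (i + 1); omega

def cumulative_by_date_alt (date_list : List String) (word_list : List String) : List String × List Int :=
  let s := PySem.List.sorted date_list (fun x => x) false
  altOuter s s.length 0 [] []

-- ===== PRECONDITION & SPEC =====
def Spec_cumulative_by_date (date_list : List String) (word_list : List String) (out : List String × List Int) : Prop := out = cumulative_by_date_alt date_list word_list
instance (date_list : List String) (word_list : List String) (out : List String × List Int) : Decidable (Spec_cumulative_by_date date_list word_list out) := by unfold Spec_cumulative_by_date; infer_instance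

-- ===== CLAIM (what is proved, stated in full; the proofs are below) =====
def Claim_equal_cumulative_by_date : Prop := ∀ (date_list : List String) (word_list : List String), Dom_cumulative_by_date date_list word_list → Spec_cumulative_by_date date_list word_list (cumulative_by_date date_list word_list)

-- ===== LEMMAS AND PROOFS =====

-- group heads of a sorted list: its distinct elements in (strictly) increasing order
def usF : List String → List String
  | [] => []
  | x :: xs => x :: usF (xs.dropWhile (fun y => y == x))
termination_by s => s.length
decreasing_by have := List.length_dropWhile_le (fun y => y == x) xs; simpa using Nat.lt_succ_of_le this

-- group-end positions (= cumulative counts) of a sorted list, after c earlier elements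
def posF : List String → Int → List Int
  | [], _ => []
  | x :: xs, c =>
    let k : Int := 1 + (xs.takeWhile (fun y => y == x)).length
    (c + k) :: posF (xs.dropWhile (fun y => y == x)) (c + k)
termination_by s _ => s.length
decreasing_by have := List.length_dropWhile_le (fun y => y == x) xs; simpa using Nat.lt_succ_of_le this

theorem mem_usF (s : List String) (y : String) : y ∈ usF s ↔ y ∈ s := by
  fun_induction usF s with
  | case1 => simp
  | case2 x xs ih =>
    simp only [List.mem_cons, ih]
    constructor
    · rintro (rfl | h)
      · exact Or.inl rfl
      · exact Or.inr (List.dropWhile_sublist _ |>.mem h)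
    · rintro (rfl | h)
      · exact Or.inl rfl
      · rcases (List.takeWhile_append_dropWhile (p := fun y => y == x) (l := xs)) ▸ h with h'
        rcases List.mem_append.mp h' with h2 | h2
        · left
          have := List.mem_takeWhile_imp h2
          simpa using this.symm
        · exact Or.inr h2

theorem lt_of_mem_dropWhile (x : String) (xs : List String)
    (hle : ∀ y ∈ xs, x ≤ y) (hp : xs.Pairwise (· ≤ ·)) :
    ∀ y ∈ xs.dropWhile (fun y => y == x), x < y := by
  induction xs with
  | nil => simp
  | cons a t ih =>
    intro y hy
    by_cases ha : a == x
    · simp only [List.dropWhile_cons, ha, if_pos] at hy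
      exact ih (fun z hz => hle z (List.mem_cons_of_mem _ hz)) hp.tail y hy
    · simp only [List.dropWhile_cons, ha, if_neg, Bool.false_eq_true, not_false_iff] at hy
      have hxa : x < a := lt_of_le_of_ne (hle a (List.mem_cons_self)) (fun h => ha (beq_iff_eq.mpr h.symm))
      rcases List.mem_cons.mp hy with rfl | hy'
      · exact hxa
      · exact lt_of_lt_of_le hxa ((List.pairwise_cons.mp hp).1 y hy')

theorem pairwise_usF (s : List String) (hs : s.Pairwise (· ≤ ·)) : (usF s).Pairwise (· < ·) := by
  fun_induction usF s with
  | case1 => simp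
  | case2 x xs ih =>
    have hd := List.pairwise_cons.mp hs
    refine List.pairwise_cons.mpr ⟨?_, ih (hd.2.sublist (List.dropWhile_sublist _))⟩
    intro y hy
    exact lt_of_mem_dropWhile x xs hd.1 hd.2 y ((mem_usF _ y).mp hy)

theorem nodup_usF (s : List String) (hs : s.Pairwise (· ≤ ·)) : (usF s).Nodup :=
  (pairwise_usF s hs).imp ne_of_lt

-- A's uniq list is exactly the list of group heads of the sorted input
theorem A_uniq (dl : List String) :
    PySem.List.sorted (PySem.Set.ofList dl) (fun x => x) false
      = usF (PySem.List.sorted dl (fun x => x) false) := by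
  apply PySem.List.sorted_eq_of_perm_of_pairwise_lt
  · apply (List.perm_ext_iff_of_nodup (nodup_usF _ (PySem.List.sorted_pairwise dl (fun x => x))) (PySem.Set.nodup_ofList dl)).mpr
    intro a
    rw [mem_usF, PySem.List.mem_sorted, PySem.Set.mem_ofList]
  · exact pairwise_usF _ (PySem.List.sorted_pairwise dl (fun x => x))

-- multiplicity of the head of a sorted list = 1 + length of the leading run behind it
theorem count_head (x : String) (xs : List String)
    (hle : ∀ y ∈ xs, x ≤ y) (hp : xs.Pairwise (· ≤ ·)) :
    (x :: xs).count x = 1 + (xs.takeWhile (fun y => y == x)).length := by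
  have hx : x ∉ xs.dropWhile (fun y => y == x) := fun h =>
    lt_irrefl x (lt_of_mem_dropWhile x xs hle hp x h)
  have hsplit := List.takeWhile_append_dropWhile (p := fun y => y == x) (l := xs)
  have h1 : (xs.takeWhile (fun y => y == x)).count x = (xs.takeWhile (fun y => y == x)).length := by
    apply List.count_eq_length.mpr
    intro b hb
    exact (beq_iff_eq.mp (List.mem_takeWhile_imp (p := fun y => y == x) hb)).symm
  calc (x :: xs).count x = xs.count x + 1 := List.count_cons_self ..
    _ = ((xs.takeWhile (fun y => y == x)) ++ (xs.dropWhile (fun y => y == x))).count x + 1 := by rw [hsplit]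
    _ = 1 + (xs.takeWhile (fun y => y == x)).length := by
        rw [List.count_append, h1, List.count_eq_zero.mpr hx]; omega

-- multiplicities after the first group of a sorted list are untouched by dropping it
theorem count_rest (x : String) (xs : List String) (u : String)
    (hle : ∀ y ∈ xs, x ≤ y) (hp : xs.Pairwise (· ≤ ·))
    (hu : u ∈ xs.dropWhile (fun y => y == x)) :
    (x :: xs).count u = (xs.dropWhile (fun y => y == x)).count u := by
  have hxu : x ≠ u := ne_of_lt (lt_of_mem_dropWhile x xs hle hp u hu)
  have h1 : (xs.takeWhile (fun y => y == x)).count u = 0 := by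
    apply List.count_eq_zero.mpr
    intro h
    exact hxu (beq_iff_eq.mp (List.mem_takeWhile_imp (p := fun y => y == x) h)).symm
  calc (x :: xs).count u = xs.count u := List.count_cons_of_ne hxu
    _ = _ := by
        conv_lhs => rw [← List.takeWhile_append_dropWhile (p := fun y => y == x) (l := xs)]
        rw [List.count_append, h1]; omega

-- one step of A's cumulative fold on a nonempty accumulator
theorem fA_step (b : List String) (cum0 : List Int) (c : Int) (u : String) :
    (let N : Int := (PySem.List.count b u : Int);
     if PySem.List.len (cum0 ++ [c]) = 0 then (cum0 ++ [c]) ++ [N]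
     else (cum0 ++ [c]) ++ [PySem.List.pyGetD (cum0 ++ [c]) (-1) 0 + N])
    = (cum0 ++ [c]) ++ [c + (List.count u b : Int)] := by
  have hne : PySem.List.len (cum0 ++ [c]) ≠ 0 := by
    simp [PySem.List.len_eq]; omega
  rw [if_neg hne, PySem.List.pyGetD_neg_one_append_singleton]
  simp [PySem.List.count_eq]

-- A's cumulative fold over the group heads yields the group-end positions
theorem A_fold (s : List String) : s.Pairwise (· ≤ ·) →
    ∀ (b : List String), (∀ u ∈ usF s, b.count u = s.count u) →
    ∀ (cum0 : List Int) (c : Int),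
      (usF s).foldl
        (fun acc u =>
          let N : Int := (PySem.List.count b u : Int)
          if PySem.List.len acc = 0 then acc ++ [N]
          else acc ++ [PySem.List.pyGetD acc (-1) 0 + N]) (cum0 ++ [c])
      = (cum0 ++ [c]) ++ posF s c := by
  fun_induction usF s with
  | case1 => intro _ b hb cum0 c; simp [posF]
  | case2 x xs ih =>
    intro hs b hb cum0 c
    have hd := List.pairwise_cons.mp hs
    have hbx : (List.count x b : Int)
        = 1 + ((xs.takeWhile (fun y => y == x)).length : Int) := by
      rw [hb x (by simp), count_head x xs hd.1 hd.2]
      push_cast; ring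
    rw [List.foldl_cons, fA_step, hbx]
    have hrest : ∀ u ∈ usF (xs.dropWhile (fun y => y == x)),
        b.count u = (xs.dropWhile (fun y => y == x)).count u := by
      intro u hu
      have hu' : u ∈ xs.dropWhile (fun y => y == x) := (mem_usF _ u).mp hu
      rw [hb u (by simp [hu]), count_rest x xs u hd.1 hd.2 hu']
    rw [ih (hd.2.sublist (List.dropWhile_sublist _)) b hrest (cum0 ++ [c])
      (c + (1 + ((xs.takeWhile (fun y => y == x)).length : Int)))]
    simp [posF]

theorem A_fold0 (s : List String) (hs : s.Pairwise (· ≤ ·))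
    (b : List String) (hb : ∀ u ∈ usF s, b.count u = s.count u) :
    (usF s).foldl
      (fun acc u =>
        let N : Int := (PySem.List.count b u : Int)
        if PySem.List.len acc = 0 then acc ++ [N]
        else acc ++ [PySem.List.pyGetD acc (-1) 0 + N]) []
    = posF s 0 := by
  cases s with
  | nil => simp [usF, posF]
  | cons x xs =>
    have hd := List.pairwise_cons.mp hs
    have hbx : (List.count x b : Int)
        = 1 + ((xs.takeWhile (fun y => y == x)).length : Int) := by
      rw [hb x (by simp [usF]), count_head x xs hd.1 hd.2]
      push_cast; ring
    rw [show usF (x :: xs) = x :: usF (xs.dropWhile (fun y => y == x)) from by simp [usF]]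
    rw [List.foldl_cons]
    have h0 : (let N : Int := (PySem.List.count b x : Int);
        if PySem.List.len ([] : List Int) = 0 then ([] : List Int) ++ [N]
        else [] ++ [PySem.List.pyGetD ([] : List Int) (-1) 0 + N])
        = ([] : List Int) ++ [0 + (1 + ((xs.takeWhile (fun y => y == x)).length : Int))] := by
      simp only [PySem.List.count_eq, PySem.List.len_eq, List.length_nil, Nat.cast_zero, hbx]
      simp
    rw [h0]
    have hrest : ∀ u ∈ usF (xs.dropWhile (fun y => y == x)),
        b.count u = (xs.dropWhile (fun y => y == x)).count u := by
      intro u hu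
      have hu' : u ∈ xs.dropWhile (fun y => y == x) := (mem_usF _ u).mp hu
      rw [hb u (by simp [usF, hu]), count_rest x xs u hd.1 hd.2 hu']
    rw [A_fold (xs.dropWhile (fun y => y == x)) (hd.2.sublist (List.dropWhile_sublist _))
      b hrest [] (0 + (1 + ((xs.takeWhile (fun y => y == x)).length : Int)))]
    simp [posF]

-- the inner scan finds the end of the current run
theorem altScanGroup_eq (s : List String) (i : Nat) : ∀ (j : Nat), j ≤ s.length →
    altScanGroup s s.length i j
      = j + ((s.drop j).takeWhile (fun y => y == s.getD i "")).length := by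
  intro j hj
  fun_induction altScanGroup s s.length i j with
  | case1 j h ih =>
    rw [ih (by omega)]
    have hjl : j < s.length := h.1
    rw [List.drop_eq_getElem_cons hjl]
    rw [List.takeWhile_cons_of_pos (by rw [← List.getD_eq_getElem s "" hjl]; exact h.2)]
    simp; omega
  | case2 j h =>
    rcases Nat.lt_or_ge j s.length with hjl | hjl
    · have hne : ¬(s.getD j "" == s.getD i "") = true := by
        intro hb; exact h ⟨hjl, hb⟩
      rw [List.drop_eq_getElem_cons hjl]
      rw [List.takeWhile_cons_of_neg (by rw [← List.getD_eq_getElem s "" hjl]; exact hne)]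
      simp
    · rw [List.drop_eq_nil_of_le hjl]
      simp

theorem dropWhile_eq_drop_len (p : String → Bool) (t : List String) :
    t.dropWhile p = t.drop (t.takeWhile p).length := by
  induction t with
  | nil => simp
  | cons a b ih =>
    by_cases h : p a
    · simp [h, ih]
    · simp [h]

-- the outer loop appends the group heads and group-end positions of the remaining suffix
theorem altOuter_eq (fuel : Nat) : ∀ (s : List String) (i : Nat) (uniq : List String) (cum : List Int),
    s.length - i ≤ fuel → i ≤ s.length →
    altOuter s s.length i uniq cum
      = (uniq ++ usF (s.drop i), cum ++ posF (s.drop i) (i : Int)) := by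
  induction fuel with
  | zero =>
    intro s i uniq cum hf hi
    have hi' : i = s.length := by omega
    rw [altOuter]
    rw [if_neg (by omega)]
    subst hi'
    simp [usF, posF]
  | succ m ih =>
    intro s i uniq cum hf hi
    rcases Nat.lt_or_ge i s.length with hlt | hge
    · rw [altOuter, if_pos hlt]
      have hscan := altScanGroup_eq s i (i + 1) (by omega)
      set x := s.getD i "" with hx
      set t := s.drop (i + 1) with ht
      set L := (t.takeWhile (fun y => y == x)).length with hL
      have hdropi : s.drop i = x :: t := by
        rw [List.drop_eq_getElem_cons hlt, ht, hx, List.getD_eq_getElem s "" hlt]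
      have hLle : L ≤ s.length - (i + 1) := by
        have h1 : L ≤ t.length := by
          rw [hL]; exact (List.takeWhile_sublist _).length_le
        simpa [ht, List.length_drop] using h1
      rw [hscan]
      have hdrop2 : t.dropWhile (fun y => y == x) = s.drop (i + 1 + L) := by
        rw [dropWhile_eq_drop_len, ← hL, ht, List.drop_drop]
      have := ih s (i + 1 + L) (uniq ++ [x]) (cum ++ [((i + 1 + L : Nat) : Int)])
        (by omega) (by omega)
      rw [this]
      have husF : usF (s.drop i) = x :: usF (s.drop (i + 1 + L)) := by
        rw [hdropi]; simp [usF, hdrop2]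
      have hposF : posF (s.drop i) (i : Int) = ((i + 1 + L : Nat) : Int) :: posF (s.drop (i + 1 + L)) ((i + 1 + L : Nat) : Int) := by
        rw [hdropi]
        simp only [posF, ← hL, hdrop2]
        rw [show ((i:Int) + (1 + (L:Int))) = ((i + 1 + L : Nat) : Int) from by push_cast; ring]
      rw [husF, hposF]
      simp
    · rw [altOuter, if_neg (by omega)]
      rw [List.drop_eq_nil_of_le hge]
      simp [usF, posF]

-- ===== VERDICT (by name: the statement is the Claim_ definition above) =====
theorem cumulative_by_date_spec : Claim_equal_cumulative_by_date := by
  intro dl wl _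
  unfold Spec_cumulative_by_date cumulative_by_date cumulative_by_date_alt
  set s := PySem.List.sorted dl (fun x => x) false with hsdef
  have hs : s.Pairwise (· ≤ ·) := PySem.List.sorted_pairwise dl (fun x => x)
  have hsperm : s.Perm dl := PySem.List.sorted_perm dl (fun x => x) false
  have hb : ∀ u ∈ usF s, dl.count u = s.count u := by
    intro u _
    exact (hsperm.count_eq u).symm
  rw [altOuter_eq s.length s 0 [] [] (by omega) (by omega)]
  simp only [List.drop_zero, List.nil_append, Nat.cast_zero]
  rw [A_uniq dl, ← hsdef, A_fold0 s hs dl hb]
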